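-- pv_equiv track=rewrite | github.com/capture0x/web-scanner | app.py | process_nmap_output
-- ===== SOURCE A (Python) =====
-- def process_nmap_output(lines):
--     filtered_lines = []
--     capture = False
--     for line in lines:
--         if "PORT" in line and "SERVICE" in line:
--             capture = True
--         elif capture and line.strip() == "":
--             break
--         elif capture:
--             filtered_lines.append(line)
--     return '<br>'.join(filtered_lines)
-- ===== SOURCE B (Python) =====
-- def process_nmap_output(lines):
--     def is_header(line):
--         return "PORT" in line and "SERVICE" in line
--
--     start = next((i for i, line in enumerate(lines) if is_header(line)), None)
--     if start is None:
--         return ""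
--     end = next((j for j in range(start + 1, len(lines)) if lines[j].strip() == ""),
--                len(lines))
--     block = [line for line in lines[start + 1:end] if not is_header(line)]
--     return "<br>".join(block)
-- ===== Notes on version B (the rewrite author's own statement) =====
-- stated objective: alternative
-- what changed: Replaces A's stateful capture-flag loop with an index-based decomposition: locate the first header line, locate the first blank line after it, slice the block between them and filter out further header lines before joining.
import Mathlib
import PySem

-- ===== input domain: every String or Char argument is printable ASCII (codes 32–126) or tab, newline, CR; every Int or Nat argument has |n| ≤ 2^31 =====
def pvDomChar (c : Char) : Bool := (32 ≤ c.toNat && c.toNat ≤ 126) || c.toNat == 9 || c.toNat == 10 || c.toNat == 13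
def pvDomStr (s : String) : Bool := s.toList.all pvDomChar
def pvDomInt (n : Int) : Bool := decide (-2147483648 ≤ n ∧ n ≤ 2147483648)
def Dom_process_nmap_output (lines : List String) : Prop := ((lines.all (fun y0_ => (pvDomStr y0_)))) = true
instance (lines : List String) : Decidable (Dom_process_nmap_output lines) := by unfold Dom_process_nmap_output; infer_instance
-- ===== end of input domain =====

-- B is an alternative decomposition of the same O(n) task: locate the header index and the
-- first blank line after it, slice, filter, join — instead of A's stateful capture-flag loop.

-- ===== PORT A =====
-- A's for-loop with the mutable (filtered_lines, capture) state and the break on a blank line.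
def pvALoop : List String → List String → Bool → List String
  | [], filtered, _ => filtered
  | line :: rest, filtered, capture =>
    if PySem.Str.isIn "PORT" line && PySem.Str.isIn "SERVICE" line then
      pvALoop rest filtered true
    else if capture && (PySem.Str.strip line == "") then
      filtered
    else if capture then
      pvALoop rest (filtered ++ [line]) capture
    else
      pvALoop rest filtered capture

def process_nmap_output (lines : List String) : String :=
  PySem.Str.join "<br>" (pvALoop lines [] false)

-- ===== PORT B =====
def pvIsHeader (line : String) : Bool :=
  PySem.Str.isIn "PORT" line && PySem.Str.isIn "SERVICE" line

def process_nmap_output_alt (lines : List String) : String :=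
  match lines.findIdx? pvIsHeader with
  | none => ""
  | some start =>
    let tail := lines.drop (start + 1)
    let stop := match tail.findIdx? (fun l => PySem.Str.strip l == "") with
      | some j => j
      | none => tail.length
    PySem.Str.join "<br>" ((tail.take stop).filter (fun l => !pvIsHeader l))

-- ===== PRECONDITION & SPEC =====
def Spec_process_nmap_output (lines : List String) (out : String) : Prop := out = process_nmap_output_alt lines
instance (lines : List String) (out : String) : Decidable (Spec_process_nmap_output lines out) := by unfold Spec_process_nmap_output; infer_instance

-- ===== CLAIM (what is proved, stated in full; the proofs are below) =====
def Claim_equal_process_nmap_output : Prop := ∀ (lines : List String), Dom_process_nmap_output lines → Spec_process_nmap_output lines (process_nmap_output lines)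

-- ===== LEMMAS AND PROOFS =====

-- the list A collects once capture is on, expressed structurally
def pvCollect : List String → List String
  | [] => []
  | l :: rest =>
    if pvIsHeader l then pvCollect rest
    else if PySem.Str.strip l == "" then []
    else l :: pvCollect rest

-- a string whose strip is empty consists of whitespace only
theorem pv_all_space_of_strip_nil (cs : List Char) (h : PySem.Chars.strip cs = []) :
    ∀ c ∈ cs, PySem.Chars.isspace c = true := by
  unfold PySem.Chars.strip PySem.Chars.rstrip PySem.Chars.lstrip at h
  rw [List.reverse_eq_nil_iff, List.dropWhile_eq_nil_iff] at h
  intro c hc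
  have hc' : c ∈ List.takeWhile PySem.Chars.isspace cs ++ List.dropWhile PySem.Chars.isspace cs := by
    rw [List.takeWhile_append_dropWhile]; exact hc
  rcases List.mem_append.1 hc' with h1 | h2
  · exact List.mem_takeWhile_imp h1
  · exact h c (List.mem_reverse.2 h2)

-- a header line (it contains "PORT") can never strip to the empty string
theorem pv_header_not_blank (l : String) (hh : pvIsHeader l = true) :
    (PySem.Str.strip l == "") = false := by
  cases hb : (PySem.Str.strip l == "") with
  | false => rfl
  | true =>
    exfalso
    have hstrip : PySem.Chars.strip l.toList = [] := by
      have h1 : PySem.Str.strip l = "" := (beq_iff_eq).1 hb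
      have h2 := congrArg String.toList h1
      simpa [PySem.Str.toList_strip] using h2
    have hport : PySem.Str.isIn "PORT" l = true := by
      have := hh
      rw [pvIsHeader, Bool.and_eq_true] at this
      exact this.1
    have hin : PySem.Chars.isIn "PORT".toList l.toList = true := by
      simpa [PySem.Str.isIn] using hport
    have hinf : "PORT".toList <:+: l.toList := (PySem.Chars.isIn_iff_infix _ _).1 hin
    have hP : 'P' ∈ l.toList := hinf.mem (by decide)
    have := pv_all_space_of_strip_nil l.toList hstrip 'P' hP
    simp [PySem.Chars.isspace] at this

theorem pv_aLoop_capture (rest : List String) (acc : List String) :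
    pvALoop rest acc true = acc ++ pvCollect rest := by
  induction rest generalizing acc with
  | nil => simp [pvALoop, pvCollect]
  | cons l rest ih =>
    have hEq : (PySem.Str.isIn "PORT" l && PySem.Str.isIn "SERVICE" l) = pvIsHeader l := rfl
    cases hh : pvIsHeader l with
    | true =>
      simp only [pvALoop, pvCollect, hEq, hh, if_true]
      exact ih acc
    | false =>
      simp only [pvALoop, pvCollect, hEq, hh, Bool.false_eq_true, if_false, Bool.true_and]
      cases hb : (PySem.Str.strip l == "") with
      | true => simp only [if_true, List.append_nil]
      | false =>
        simp only [Bool.false_eq_true, if_false, if_true]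
        rw [ih (acc ++ [l])]
        simp

theorem pv_aLoop_scan (lines : List String) (acc : List String) :
    pvALoop lines acc false =
      match lines.findIdx? pvIsHeader with
      | none => acc
      | some i => acc ++ pvCollect (lines.drop (i + 1)) := by
  induction lines generalizing acc with
  | nil => simp [pvALoop]
  | cons l rest ih =>
    have hEq : (PySem.Str.isIn "PORT" l && PySem.Str.isIn "SERVICE" l) = pvIsHeader l := rfl
    rw [List.findIdx?_cons]
    cases hh : pvIsHeader l with
    | true =>
      simp only [pvALoop, hEq, hh, if_true, List.drop_succ_cons, List.drop_zero]
      exact pv_aLoop_capture rest acc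
    | false =>
      simp only [pvALoop, hEq, hh, Bool.false_eq_true, if_false, Bool.false_and]
      rw [ih acc]
      cases hfi : rest.findIdx? pvIsHeader with
      | none => simp
      | some i => simp

theorem pv_collect_eq_slice (t : List String) :
    (t.take (match t.findIdx? (fun l => PySem.Str.strip l == "") with
              | some j => j
              | none => t.length)).filter (fun l => !pvIsHeader l) = pvCollect t := by
  induction t with
  | nil => simp [pvCollect]
  | cons l rest ih =>
    rw [List.findIdx?_cons]
    cases hb : (PySem.Str.strip l == "") with
    | true =>
      have hh : pvIsHeader l = false := by
        cases hEq : pvIsHeader l with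
        | false => rfl
        | true => rw [pv_header_not_blank l hEq] at hb; exact absurd hb (by simp)
      simp [pvCollect, hh, hb]
    | false =>
      simp only [pvCollect, hb, Bool.false_eq_true, if_false]
      cases hfi : rest.findIdx? (fun l => PySem.Str.strip l == "") with
      | none =>
        rw [hfi] at ih
        simp only [Option.map_none, List.length_cons, List.take_succ_cons,
          List.filter_cons] at ih ⊢
        cases hh : pvIsHeader l with
        | true => simpa [hh] using ih
        | false => simpa [hh] using congrArg (l :: ·) ih
      | some j =>
        rw [hfi] at ih
        simp only [Option.map_some, List.take_succ_cons, List.filter_cons] at ih ⊢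
        cases hh : pvIsHeader l with
        | true => simpa [hh] using ih
        | false => simpa [hh] using congrArg (l :: ·) ih

-- ===== VERDICT (by name: the statement is the Claim_ definition above) =====
theorem process_nmap_output_spec : Claim_equal_process_nmap_output := by
  intro lines _
  unfold Spec_process_nmap_output process_nmap_output process_nmap_output_alt
  rw [pv_aLoop_scan]
  cases hfi : lines.findIdx? pvIsHeader with
  | none => simp [PySem.Str.join]
  | some i =>
    simp only [List.nil_append]
    rw [← pv_collect_eq_slice (lines.drop (i + 1))]
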